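-- pv_equiv track=rewrite | github.com/thinhhoang95/project-akrav-easy-flight-planner | lateral/planner_pivot_with_heuristics_lean.py | find_eligible_range_of_nodes_to_sample
-- ===== SOURCE A (Python) =====
-- def find_eligible_range_of_nodes_to_sample(route):
--     """
--     Given a list of waypoints (route), return a tuple (start_idx, end_idx) representing
--     the contiguous index range (inclusive) in the middle of the route (i.e. excluding
--     the first and last waypoints) that contains no underscores.
--
--     If there are multiple valid contiguous blocks, the longest one is returned.
--     If no eligible middle waypoints are found, returns None.
--     """
--     # There must be at least three waypoints (start, at least one middle, end)
--     if len(route) < 3: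
--         return None
--
--     # Consider only the middle nodes: indices 1 to len(route)-2 inclusive.
--     # Create a list of indices where the waypoint does not contain an underscore.
--     eligible_indices = [i for i in range(1, len(route) - 1) if '_' not in route[i]]
--
--     # If there are no eligible middle waypoints, return None.
--     if not eligible_indices:
--         return None
--
--     # Find the longest contiguous block of eligible indices.
--     longest_start = current_start = eligible_indices[0]
--     longest_length = current_length = 1
--
--     for idx in eligible_indices[1:]:
--         # If this index continues the current contiguous block...
--         if idx == current_start + current_length:
--             current_length += 1
--         else:
--             # Check if the current block is the longest so far.
--             if current_length > longest_length:
--                 longest_length = current_length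
--                 longest_start = current_start
--             # Reset the current block
--             current_start = idx
--             current_length = 1
--
--     # Final check in case the last block is the longest.
--     if current_length > longest_length:
--         longest_length = current_length
--         longest_start = current_start
--
--     longest_end = longest_start + longest_length - 1
--
--     return [longest_start, longest_end]
-- ===== SOURCE B (Python) =====
-- from itertools import groupby
--
--
-- def find_eligible_range_of_nodes_to_sample(route):
--     if len(route) < 3:
--         return None
--     # Decompose the middle indices into maximal runs of equal eligibility.
--     runs = []
--     for ok, grp in groupby(range(1, len(route) - 1), key=lambda i: '_' not in route[i]):
--         if ok:
--             idxs = list(grp)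
--             runs.append((idxs[0], len(idxs)))
--     best = max(runs, key=lambda r: r[1], default=None)  # earliest run wins ties
--     if best is None:
--         return None
--     start, length = best
--     return [start, start + length - 1]
-- ===== Notes on version B (the rewrite author's own statement) =====
-- stated objective: idiomatic
-- what changed: Replaces A's filter-then-scan with reset-on-adjacency state machine by an itertools.groupby decomposition of the middle indices into maximal eligibility runs followed by a single max(key=length, default=None) selection.
import Mathlib
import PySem

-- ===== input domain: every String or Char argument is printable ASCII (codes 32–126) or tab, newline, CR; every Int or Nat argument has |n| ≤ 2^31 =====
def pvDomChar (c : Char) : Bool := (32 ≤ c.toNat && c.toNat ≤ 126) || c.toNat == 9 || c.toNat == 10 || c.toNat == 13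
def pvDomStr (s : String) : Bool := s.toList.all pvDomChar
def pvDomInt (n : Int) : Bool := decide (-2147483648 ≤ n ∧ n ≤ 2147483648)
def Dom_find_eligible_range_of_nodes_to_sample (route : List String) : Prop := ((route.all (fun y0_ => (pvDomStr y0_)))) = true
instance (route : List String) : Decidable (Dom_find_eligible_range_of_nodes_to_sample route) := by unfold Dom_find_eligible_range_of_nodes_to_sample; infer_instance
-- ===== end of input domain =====

-- B replaces A's filter-then-scan state machine by a groupby run decomposition plus a max selection (idiomatic; same cost).


-- ===== PORT A =====
-- A's for-loop over eligible_indices[1:], state (longest_start, longest_length, current_start, current_length);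
-- the [] case carries out the "final check" A performs after the loop.
def pvALoop : List Int → Int → Int → Int → Int → Int × Int
  | [], ls, ll, cs, cl => if cl > ll then (cs, cl) else (ls, ll)
  | idx :: t, ls, ll, cs, cl =>
    if idx = cs + cl then pvALoop t ls ll cs (cl + 1)
    else if cl > ll then pvALoop t cs cl idx 1
    else pvALoop t ls ll idx 1

def find_eligible_range_of_nodes_to_sample (route : List String) : Option (List Int) :=
  if (route.length : Int) < 3 then none
  else
    -- route[i] for i in range(1, len(route)-1) is always in range, so pyGetD is exact here
    match (PySem.List.pyRange 1 ((route.length : Int) - 1)).filter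
        (fun i => !(PySem.Str.isIn "_" (PySem.List.pyGetD route i ""))) with
    | [] => none
    | e0 :: rest =>
      match pvALoop rest e0 1 e0 1 with
      | (ls, ll) => some [ls, ls + ll - 1]

-- ===== PORT B =====
-- port of itertools.groupby on a list of ints: maximal blocks of equal key, as (key value, members)
def pvGroupby (key : Int → Bool) : List Int → List (Bool × List Int)
  | [] => []
  | i :: t =>
    (key i, i :: t.takeWhile (fun j => key j == key i)) ::
      pvGroupby key (t.dropWhile (fun j => key j == key i))
  termination_by l => l.length
  decreasing_by
    simpa using Nat.lt_succ_of_le (List.length_dropWhile_le _ t)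

-- B's runs-collecting loop: (start, length) of each eligible group (groups are nonempty, so headD is exact)
def pvRuns (key : Int → Bool) (l : List Int) : List (Int × Int) :=
  (pvGroupby key l).foldl
    (fun acc g => if g.1 then acc ++ [(g.2.headD 0, (g.2.length : Int))] else acc) []

def find_eligible_range_of_nodes_to_sample_alt (route : List String) : Option (List Int) :=
  if (route.length : Int) < 3 then none
  else
    match PySem.List.max?
        (pvRuns (fun i => !(PySem.Str.isIn "_" (PySem.List.pyGetD route i "")))
          (PySem.List.pyRange 1 ((route.length : Int) - 1)))
        (fun r => r.2) with
    | none => none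
    | some best => some [best.1, best.1 + best.2 - 1]

-- ===== PRECONDITION & SPEC =====
def Spec_find_eligible_range_of_nodes_to_sample (route : List String) (out : Option (List Int)) : Prop := out = find_eligible_range_of_nodes_to_sample_alt route
instance (route : List String) (out : Option (List Int)) : Decidable (Spec_find_eligible_range_of_nodes_to_sample route out) := by unfold Spec_find_eligible_range_of_nodes_to_sample; infer_instance

-- ===== CLAIM (what is proved, stated in full; the proofs are below) =====
def Claim_equal_find_eligible_range_of_nodes_to_sample : Prop := ∀ (route : List String), Dom_find_eligible_range_of_nodes_to_sample route → Spec_find_eligible_range_of_nodes_to_sample route (find_eligible_range_of_nodes_to_sample route)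

-- ===== LEMMAS AND PROOFS =====

-- proof-side helpers: A's best-update step and its fold over a run list
def pvStep (b r : Int × Int) : Int × Int := if b.2 < r.2 then r else b
def pvBest (runs : List (Int × Int)) (b : Int × Int) : Int × Int := runs.foldl pvStep b

lemma pvMax?_cons (x : Int × Int) (t : List (Int × Int)) :
    PySem.List.max? (x :: t) (fun r => r.2) = some (pvBest t x) := by
  simp only [PySem.List.max?, List.foldl_cons]
  induction t generalizing x with
  | nil => simp [pvBest]
  | cons r t ih =>
    simp only [List.foldl_cons, pvBest, List.foldl_cons] at *
    rw [show (if x.2 < r.2 then some r else some x) = some (pvStep x r) from by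
      unfold pvStep; exact (apply_ite some _ _ _).symm]
    exact ih (pvStep x r)

lemma pvChainMap : ∀ (g : List Int) (a : Int),
    List.IsChain (fun x y => y = x + 1) (a :: g) →
    g = PySem.List.pyRange (a + 1) (a + 1 + (g.length : Int)) := by
  intro g
  induction g with
  | nil => intro a _; simp [PySem.List.pyRange_one_eq_nil]
  | cons x g ih =>
    intro a h
    rw [List.isChain_cons] at h
    obtain ⟨h1, h2⟩ := h
    have hx : x = a + 1 := by simpa using h1 x (by simp)
    subst hx
    have hg := ih (a + 1) h2
    rw [PySem.List.pyRange_one_cons (by simp only [List.length_cons]; push_cast; omega)]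
    refine List.cons_eq_cons.mpr ⟨rfl, ?_⟩
    conv_lhs => rw [hg]
    congr 1
    simp only [List.length_cons]
    push_cast
    ring

lemma pvChainLast : ∀ (g : List Int) (a : Int),
    List.IsChain (fun x y => y = x + 1) (a :: g) →
    (a :: g).getLast? = some (a + g.length) := by
  intro g
  induction g with
  | nil => intro a _; simp
  | cons x g ih =>
    intro a h
    rw [List.isChain_cons] at h
    obtain ⟨h1, h2⟩ := h
    have hx : x = a + 1 := by simpa using h1 x (by simp)
    subst hx
    rw [List.getLast?_cons_cons, ih (a + 1) h2]
    congr 1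
    simp only [List.length_cons]
    push_cast
    ring

lemma pvChainGT (r' : List Int) (y : Int)
    (h : List.IsChain (fun x y => y = x + 1) (y :: r')) :
    ∀ x ∈ r', y < x := by
  intro x hx
  rw [pvChainMap r' y h] at hx
  rw [PySem.List.mem_pyRange_one] at hx
  omega

lemma pvChain_pyRange (a b : Int) :
    List.IsChain (fun x y => y = x + 1) (PySem.List.pyRange a b) := by
  by_cases h : b ≤ a
  · rw [PySem.List.pyRange_one_eq_nil h]; exact List.IsChain.nil
  · rw [not_le] at h
    rw [PySem.List.pyRange_one_cons h, List.isChain_cons]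
    refine ⟨?_, pvChain_pyRange (a + 1) b⟩
    intro y hy
    by_cases h2 : a + 1 < b
    · rw [PySem.List.pyRange_one_cons h2] at hy
      simp at hy; omega
    · rw [PySem.List.pyRange_one_eq_nil (by omega)] at hy
      simp at hy
  termination_by (b - a).toNat
  decreasing_by omega

lemma pvALoop_block : ∀ (k : Nat) (X : List Int) (ls ll cs cl : Int),
    pvALoop (PySem.List.pyRange (cs + cl) (cs + cl + (k : Int)) ++ X) ls ll cs cl
      = pvALoop X ls ll cs (cl + k) := by
  intro k
  induction k with
  | zero => intro X ls ll cs cl; simp [PySem.List.pyRange_one_eq_nil]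
  | succ k ih =>
    intro X ls ll cs cl
    rw [PySem.List.pyRange_one_cons (by push_cast; omega), List.cons_append]
    rw [pvALoop, if_pos rfl]
    have hm : PySem.List.pyRange (cs + cl + 1) (cs + cl + ((k : Int) + 1))
        = PySem.List.pyRange (cs + (cl + 1)) (cs + (cl + 1) + (k : Int)) := by
      congr 1 <;> ring
    push_cast
    rw [hm, ih X ls ll cs (cl + 1)]
    congr 1
    ring

lemma pvRuns_eq (key : Int → Bool) (l : List Int) :
    pvRuns key l
      = ((pvGroupby key l).filter (fun g => g.1)).map (fun g => (g.2.headD 0, (g.2.length : Int))) := by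
  unfold pvRuns
  simpa using PySem.List.foldl_append_if (fun g : Bool × List Int => g.1)
    (fun g => (g.2.headD 0, (g.2.length : Int))) (pvGroupby key l) []

lemma pvRuns_nil (key : Int → Bool) : pvRuns key [] = [] := by
  simp [pvRuns_eq, pvGroupby]

lemma pvRuns_cons_true (key : Int → Bool) (i : Int) (t : List Int) (h : key i = true) :
    pvRuns key (i :: t)
      = (i, (((i :: t.takeWhile (fun j => key j == key i)).length : Nat) : Int))
          :: pvRuns key (t.dropWhile (fun j => key j == key i)) := by
  rw [pvRuns_eq, pvGroupby]
  simp [h, pvRuns_eq]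

lemma pvRuns_cons_false (key : Int → Bool) (i : Int) (t : List Int) (h : key i = false) :
    pvRuns key (i :: t) = pvRuns key (t.dropWhile (fun j => key j == key i)) := by
  rw [pvRuns_eq, pvGroupby]
  simp [h, pvRuns_eq]

lemma pvRestGT (key : Int → Bool) (i : Int) (t : List Int) (hki : key i = true)
    (hcg : List.IsChain (fun x y => y = x + 1) (i :: t.takeWhile (fun j => key j == key i)))
    (hcr : List.IsChain (fun x y => y = x + 1) (t.dropWhile (fun j => key j == key i)))
    (hlink : ∀ x ∈ (i :: t.takeWhile (fun j => key j == key i)).getLast?,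
      ∀ y ∈ (t.dropWhile (fun j => key j == key i)).head?, y = x + 1) :
    ∀ x ∈ t.dropWhile (fun j => key j == key i), key x = true →
      i + (1 + ((t.takeWhile (fun j => key j == key i)).length : Int)) < x := by
  intro x hx hkx
  match hr : t.dropWhile (fun j => key j == key i) with
  | [] => rw [hr] at hx; simp at hx
  | y :: r' =>
    rw [hr] at hx hcr hlink
    have hy : y = i + ((t.takeWhile (fun j => key j == key i)).length : Int) + 1 := by
      have hlast := pvChainLast _ i hcg
      have := hlink _ (by rw [hlast]; rfl) y (by rfl)
      omega
    have hky : key y = false := by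
      have h1 := List.head_dropWhile_not (fun j => key j == key i) (l := t)
        (by simp [hr] : t.dropWhile (fun j => key j == key i) ≠ [])
      have h2 : (key y == key i) = false := by simpa [hr] using h1
      rw [hki] at h2
      simpa using h2
    rcases List.mem_cons.mp hx with rfl | hx'
    · rw [hky] at hkx; exact absurd hkx (by simp)
    · have := pvChainGT r' y hcr x hx'
      omega

-- A's scan over the filtered indices computes the fold of the best-update step over B's runs
lemma pvCore : ∀ (n : Nat) (l : List Int), l.length ≤ n →
    ∀ (key : Int → Bool) (ls ll cs cl : Int),
    List.IsChain (fun x y => y = x + 1) l →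
    (∀ x ∈ l, key x = true → cs + cl < x) →
    pvALoop (l.filter key) ls ll cs cl
      = pvBest (pvRuns key l) (if cl > ll then (cs, cl) else (ls, ll)) := by
  intro n
  induction n with
  | zero =>
    intro l hl key ls ll cs cl _ _
    match l with
    | [] => simp [pvRuns_nil, pvBest, pvALoop]
    | x :: t => simp at hl
  | succ n ih =>
    intro l hl key ls ll cs cl hc hk
    match l with
    | [] => simp [pvRuns_nil, pvBest, pvALoop]
    | i :: t =>
      have htg : t.takeWhile (fun j => key j == key i) ++ t.dropWhile (fun j => key j == key i) = t :=
        List.takeWhile_append_dropWhile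
      have hlr : (t.dropWhile (fun j => key j == key i)).length ≤ n := by
        have := List.length_dropWhile_le (fun j => key j == key i) t
        simp only [List.length_cons] at hl
        omega
      have hchain : List.IsChain (fun x y => y = x + 1)
          ((i :: t.takeWhile (fun j => key j == key i)) ++ t.dropWhile (fun j => key j == key i)) := by
        rw [List.cons_append, htg]; exact hc
      rw [List.isChain_append] at hchain
      obtain ⟨hcg, hcr, hlink⟩ := hchain
      have hgkey : ∀ x ∈ t.takeWhile (fun j => key j == key i), key x = key i :=
        fun x hx => by simpa using List.mem_takeWhile_imp hx
      by_cases hki : key i = true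
      · -- first group is eligible
        have hfil : (i :: t).filter key
            = i :: (t.takeWhile (fun j => key j == key i)
                ++ (t.dropWhile (fun j => key j == key i)).filter key) := by
          conv_lhs => rw [← htg]
          rw [← List.cons_append, List.filter_append, List.filter_cons_of_pos (by simp [hki]),
            List.filter_eq_self.mpr (fun x hx => (hgkey x hx).trans hki)]
          rw [List.cons_append]
        have hne : ¬ i = cs + cl := by
          have := hk i (by simp) hki; omega
        -- the rest of the first run is consumed by the adjacency branch of A's loop
        have hblock : ∀ LS LL : Int,
            pvALoop ((t.takeWhile (fun j => key j == key i)
                ++ (t.dropWhile (fun j => key j == key i)).filter key)) LS LL i 1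
              = pvBest (pvRuns key (t.dropWhile (fun j => key j == key i)))
                  (if (1 + ((t.takeWhile (fun j => key j == key i)).length : Int)) > LL
                   then (i, 1 + ((t.takeWhile (fun j => key j == key i)).length : Int))
                   else (LS, LL)) := by
          intro LS LL
          conv_lhs => rw [pvChainMap _ i hcg]
          rw [pvALoop_block (t.takeWhile (fun j => key j == key i)).length _ LS LL i 1]
          exact ih _ hlr key LS LL i (1 + ((t.takeWhile (fun j => key j == key i)).length : Int)) hcr
            (pvRestGT key i t hki hcg hcr hlink)
        rw [hfil]
        rw [show pvALoop (i :: (t.takeWhile (fun j => key j == key i)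
              ++ (t.dropWhile (fun j => key j == key i)).filter key)) ls ll cs cl
            = if i = cs + cl then pvALoop (t.takeWhile (fun j => key j == key i)
                ++ (t.dropWhile (fun j => key j == key i)).filter key) ls ll cs (cl + 1)
              else if cl > ll then pvALoop (t.takeWhile (fun j => key j == key i)
                ++ (t.dropWhile (fun j => key j == key i)).filter key) cs cl i 1
              else pvALoop (t.takeWhile (fun j => key j == key i)
                ++ (t.dropWhile (fun j => key j == key i)).filter key) ls ll i 1 from rfl]
        rw [if_neg hne]
        rw [pvRuns_cons_true key i t hki]
        have hlen : (((i :: t.takeWhile (fun j => key j == key i)).length : Nat) : Int)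
            = 1 + ((t.takeWhile (fun j => key j == key i)).length : Int) := by
          simp only [List.length_cons]; push_cast; ring
        rw [show pvBest ((i, (((i :: t.takeWhile (fun j => key j == key i)).length : Nat) : Int))
              :: pvRuns key (t.dropWhile (fun j => key j == key i)))
              (if cl > ll then (cs, cl) else (ls, ll))
            = pvBest (pvRuns key (t.dropWhile (fun j => key j == key i)))
              (pvStep (if cl > ll then (cs, cl) else (ls, ll))
                (i, (((i :: t.takeWhile (fun j => key j == key i)).length : Nat) : Int))) from rfl]
        rw [hlen]
        by_cases hcll : cl > ll
        · rw [if_pos hcll, hblock cs cl]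
          simp [pvStep, gt_iff_lt, hcll]
        · rw [if_neg hcll, hblock ls ll]
          rw [gt_iff_lt] at hcll
          simp [pvStep, gt_iff_lt, if_neg hcll]
      · -- first group is ineligible: it disappears from both sides
        have hki' : key i = false := by revert hki; cases key i <;> simp
        have hfil : (i :: t).filter key = (t.dropWhile (fun j => key j == key i)).filter key := by
          conv_lhs => rw [← htg]
          rw [← List.cons_append, List.filter_append, List.filter_cons_of_neg (by simp [hki']),
            List.filter_eq_nil_iff.mpr (fun x hx => by simp [(hgkey x hx).trans hki'])]
          simp
        rw [hfil, pvRuns_cons_false key i t hki']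
        exact ih _ hlr key ls ll cs cl hcr
          (fun x hx hkx => hk x (by
            rw [List.mem_cons]; right; rw [← htg]; exact List.mem_append_right _ hx) hkx)

lemma pvTop : ∀ (n : Nat) (l : List Int), l.length ≤ n →
    ∀ (key : Int → Bool),
    List.IsChain (fun x y => y = x + 1) l →
    (match l.filter key with
     | [] => (none : Option (Int × Int))
     | e0 :: rest => some (pvALoop rest e0 1 e0 1))
      = PySem.List.max? (pvRuns key l) (fun r => r.2) := by
  intro n
  induction n with
  | zero =>
    intro l hl key _
    match l with
    | [] => simp [pvRuns_nil, PySem.List.max?]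
    | x :: t => simp at hl
  | succ n ih =>
    intro l hl key hc
    match l with
    | [] => simp [pvRuns_nil, PySem.List.max?]
    | i :: t =>
      have htg : t.takeWhile (fun j => key j == key i) ++ t.dropWhile (fun j => key j == key i) = t :=
        List.takeWhile_append_dropWhile
      have hlr : (t.dropWhile (fun j => key j == key i)).length ≤ n := by
        have := List.length_dropWhile_le (fun j => key j == key i) t
        simp only [List.length_cons] at hl
        omega
      have hchain : List.IsChain (fun x y => y = x + 1)
          ((i :: t.takeWhile (fun j => key j == key i)) ++ t.dropWhile (fun j => key j == key i)) := by
        rw [List.cons_append, htg]; exact hc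
      rw [List.isChain_append] at hchain
      obtain ⟨hcg, hcr, hlink⟩ := hchain
      have hgkey : ∀ x ∈ t.takeWhile (fun j => key j == key i), key x = key i :=
        fun x hx => by simpa using List.mem_takeWhile_imp hx
      by_cases hki : key i = true
      · have hfil : (i :: t).filter key
            = i :: (t.takeWhile (fun j => key j == key i)
                ++ (t.dropWhile (fun j => key j == key i)).filter key) := by
          conv_lhs => rw [← htg]
          rw [← List.cons_append, List.filter_append, List.filter_cons_of_pos (by simp [hki]),
            List.filter_eq_self.mpr (fun x hx => (hgkey x hx).trans hki)]
          rw [List.cons_append]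
        rw [hfil]
        show some (pvALoop (t.takeWhile (fun j => key j == key i)
            ++ (t.dropWhile (fun j => key j == key i)).filter key) i 1 i 1)
          = PySem.List.max? (pvRuns key (i :: t)) (fun r => r.2)
        conv_lhs => rw [pvChainMap _ i hcg]
        rw [pvALoop_block (t.takeWhile (fun j => key j == key i)).length _ i 1 i 1]
        rw [pvCore n _ hlr key i 1 i (1 + ((t.takeWhile (fun j => key j == key i)).length : Int)) hcr
          (pvRestGT key i t hki hcg hcr hlink)]
        rw [pvRuns_cons_true key i t hki, pvMax?_cons]
        have hlen : (((i :: t.takeWhile (fun j => key j == key i)).length : Nat) : Int)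
            = 1 + ((t.takeWhile (fun j => key j == key i)).length : Int) := by
          simp only [List.length_cons]; push_cast; ring
        rw [hlen]
        by_cases h : (1 : Int) + ((t.takeWhile (fun j => key j == key i)).length : Int) > 1
        · rw [if_pos h]
        · rw [if_neg h]
          have h0 : ((t.takeWhile (fun j => key j == key i)).length : Int) = 0 := by omega
          rw [h0]
          norm_num
      · have hki' : key i = false := by revert hki; cases key i <;> simp
        have hfil : (i :: t).filter key = (t.dropWhile (fun j => key j == key i)).filter key := by
          conv_lhs => rw [← htg]
          rw [← List.cons_append, List.filter_append, List.filter_cons_of_neg (by simp [hki']),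
            List.filter_eq_nil_iff.mpr (fun x hx => by simp [(hgkey x hx).trans hki'])]
          simp
        rw [hfil, pvRuns_cons_false key i t hki']
        exact ih _ hlr key hcr

-- ===== VERDICT (by name: the statement is the Claim_ definition above) =====
theorem find_eligible_range_of_nodes_to_sample_spec : Claim_equal_find_eligible_range_of_nodes_to_sample := by
  intro route _
  unfold Spec_find_eligible_range_of_nodes_to_sample
  unfold find_eligible_range_of_nodes_to_sample find_eligible_range_of_nodes_to_sample_alt
  by_cases h3 : (route.length : Int) < 3
  · simp [h3]
  · simp only [if_neg h3]
    have htop := pvTop (PySem.List.pyRange 1 ((route.length : Int) - 1)).length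
      (PySem.List.pyRange 1 ((route.length : Int) - 1)) le_rfl
      (fun i => !(PySem.Str.isIn "_" (PySem.List.pyGetD route i "")))
      (pvChain_pyRange 1 ((route.length : Int) - 1))
    cases hE : (PySem.List.pyRange 1 ((route.length : Int) - 1)).filter
        (fun i => !(PySem.Str.isIn "_" (PySem.List.pyGetD route i ""))) with
    | nil =>
      rw [hE] at htop
      rw [← htop]
    | cons e0 rest =>
      rw [hE] at htop
      rw [← htop]
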